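-- pv_equiv track=rewrite | github.com/jkelomak/kelocalc | app.py | separate_minusoperators
-- ===== SOURCE A (Python) =====
-- def separate_minusoperators(query):
--     is_unary = True
--     q_list = list(query)
--     for idx, sym in enumerate(q_list):
--         if sym is '-' and not is_unary:
--             q_list[idx] = '_'
--         is_unary = False
--         if sym is '(':
--             is_unary = True
--     return "".join(q_list)
-- ===== SOURCE B (Python) =====
-- def separate_minusoperators(query):
--     # Split on '(': within each segment the first character sits at string
--     # start or right after '(', so its minus is unary; every later '-' is binary.
--     return '('.join(seg[:1] + seg[1:].replace('-', '_')
--                     for seg in query.split('('))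
-- ===== Notes on version B (the rewrite author's own statement) =====
-- stated objective: idiomatic
-- what changed: Replaced the character-by-character state-machine loop with staged string operations: split the string on the opening parenthesis, keep each segment's first character and bulk-replace the remaining minus signs with underscores, then rejoin the segments.
import Mathlib
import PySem

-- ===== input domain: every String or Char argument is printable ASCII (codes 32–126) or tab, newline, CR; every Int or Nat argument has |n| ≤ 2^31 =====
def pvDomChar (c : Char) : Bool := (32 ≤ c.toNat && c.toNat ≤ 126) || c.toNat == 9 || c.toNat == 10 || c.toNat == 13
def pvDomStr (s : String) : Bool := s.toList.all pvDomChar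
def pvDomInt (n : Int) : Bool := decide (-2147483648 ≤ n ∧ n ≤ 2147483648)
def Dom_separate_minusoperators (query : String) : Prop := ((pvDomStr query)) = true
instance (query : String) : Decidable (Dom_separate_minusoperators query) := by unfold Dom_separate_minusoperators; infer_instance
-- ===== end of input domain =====

-- B replaces A's flag-carrying character loop by staged string operations
-- (split on '(', bulk-replace '-' in each segment's tail, rejoin); objective: idiomatic.

-- ===== PORT A =====
-- literal port of A: fold carrying the is_unary flag, rebuilding the char list
def separate_minusoperators (query : String) : String :=
  String.ofList ((query.toList.foldl
    (fun (st : Bool × List Char) sym =>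
      let out := if sym = '-' ∧ st.1 = false then '_' else sym
      ((sym == '('), st.2 ++ [out]))
    (true, [])).2)

-- ===== PORT B =====
-- '-' → '_' (the body of Source B's str.replace)
def pvRep (c : Char) : Char := if c = '-' then '_' else c

-- seg[:1] + seg[1:].replace('-','_')
def pvSegMap (seg : List Char) : List Char := seg.take 1 ++ (seg.drop 1).map pvRep

-- port of B: split on '(', map pvSegMap over the segments, rejoin with '('
def separate_minusoperators_alt (query : String) : String :=
  String.ofList (List.intercalate ['('] ((query.toList.splitOn '(').map pvSegMap))

-- ===== PRECONDITION & SPEC =====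
def Spec_separate_minusoperators (query : String) (out : String) : Prop := out = separate_minusoperators_alt query
instance (query : String) (out : String) : Decidable (Spec_separate_minusoperators query out) := by unfold Spec_separate_minusoperators; infer_instance

-- ===== CLAIM (what is proved, stated in full; the proofs are below) =====
def Claim_equal_separate_minusoperators : Prop := ∀ (query : String), Dom_separate_minusoperators query → Spec_separate_minusoperators query (separate_minusoperators query)

-- ===== LEMMAS AND PROOFS =====

-- reference single-pass form: each char replaced iff it is '-' and its predecessor p ≠ '('
def pvPm (p : Char) : List Char → List Char
  | [] => []
  | c :: rest => (if c = '-' ∧ p ≠ '(' then '_' else c) :: pvPm c rest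

lemma pvPm_congr (p q : Char) (cs : List Char) (h : (p = '(') ↔ (q = '(')) :
    pvPm p cs = pvPm q cs := by
  cases cs with
  | nil => rfl
  | cons c rest =>
    simp only [pvPm]
    congr 1
    by_cases hp : p = '('
    · simp [hp, h.mp hp]
    · have hq : q ≠ '(' := fun hq => hp (h.mpr hq)
      simp [hp, hq]

-- A's fold equals the reference form
lemma foldA_eq_pvPm (cs : List Char) (b : Bool) (acc : List Char) :
    (cs.foldl
      (fun (st : Bool × List Char) sym =>
        let out := if sym = '-' ∧ st.1 = false then '_' else sym
        ((sym == '('), st.2 ++ [out]))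
      (b, acc)).2
    = acc ++ pvPm (if b then '(' else 'x') cs := by
  induction cs generalizing b acc with
  | nil => simp [pvPm]
  | cons c rest ih =>
    simp only [List.foldl_cons]
    rw [ih]
    have hhead : (if c = '-' ∧ b = false then '_' else c)
        = (if c = '-' ∧ (if b then '(' else 'x') ≠ '(' then '_' else c) := by
      cases b <;> simp
    have htail : pvPm (if (c == '(') then '(' else 'x') rest = pvPm c rest := by
      apply pvPm_congr
      by_cases hc : c = '(' <;> simp [hc]
    simp only [hhead, htail, pvPm, List.append_assoc, List.singleton_append]

-- first segment mapped with/without head protection, later segments with pvSegMap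
def pvMF (protect : Bool) : List (List Char) → List (List Char)
  | [] => []
  | h :: t => (if protect then pvSegMap h else h.map pvRep) :: t.map pvSegMap

lemma intercalate_cons_ne_nil (s x : List Char) (xs : List (List Char)) (h : xs ≠ []) :
    List.intercalate s (x :: xs) = x ++ s ++ List.intercalate s xs := by
  obtain ⟨y, ys, rfl⟩ := List.exists_cons_of_ne_nil h
  simp [List.intercalate]

-- master lemma: B's staged pipeline equals the reference single-pass form
lemma splitB_eq_pvPm (cs : List Char) (protect : Bool) :
    List.intercalate ['('] (pvMF protect (cs.splitOnP (· == '(')))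
      = pvPm (if protect then '(' else 'x') cs := by
  induction cs generalizing protect with
  | nil =>
    cases protect <;> simp [List.splitOnP_nil, pvMF, pvSegMap, pvPm, List.intercalate]
  | cons c rest ih =>
    rw [List.splitOnP_cons]
    by_cases hc : c = '('
    · subst hc
      simp only [beq_self_eq_true, if_true]
      obtain ⟨hd, tl, hsp⟩ := List.exists_cons_of_ne_nil (List.splitOnP_ne_nil (· == '(') rest)
      rw [hsp]
      have hmf : pvMF protect ([] :: hd :: tl) = [] :: (hd :: tl).map pvSegMap := by
        cases protect <;> simp [pvMF, pvSegMap]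
      rw [hmf]
      rw [intercalate_cons_ne_nil _ _ _ (by simp)]
      have := ih (protect := true)
      rw [hsp] at this
      have hmt : pvMF true (hd :: tl) = (hd :: tl).map pvSegMap := by
        simp [pvMF, pvSegMap]
      rw [hmt] at this
      rw [this]
      cases protect <;> simp [pvPm]
    · have hbeq : (c == '(') = false := by simp [hc]
      rw [hbeq]
      simp only [Bool.false_eq_true, if_false]
      obtain ⟨hd, tl, hsp⟩ := List.exists_cons_of_ne_nil (List.splitOnP_ne_nil (· == '(') rest)
      rw [hsp]
      have hmf : pvMF protect (List.modifyHead (List.cons c) (hd :: tl))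
          = ((if c = '-' ∧ (if protect then '(' else 'x') ≠ '(' then '_' else c)
              :: hd.map pvRep) :: tl.map pvSegMap := by
        cases protect <;> simp [pvMF, pvSegMap, pvRep, List.modifyHead]
      rw [hmf]
      have hstep : List.intercalate ['(']
            (((if c = '-' ∧ (if protect then '(' else 'x') ≠ '(' then '_' else c)
              :: hd.map pvRep) :: tl.map pvSegMap)
          = (if c = '-' ∧ (if protect then '(' else 'x') ≠ '(' then '_' else c)
            :: List.intercalate ['('] (hd.map pvRep :: tl.map pvSegMap) := by
        cases tl <;> simp [List.intercalate]
      rw [hstep]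
      have hmf2 : pvMF false (hd :: tl) = hd.map pvRep :: tl.map pvSegMap := by
        simp [pvMF]
      rw [← hmf2]
      have := ih (protect := false)
      rw [hsp] at this
      rw [this]
      simp only [pvPm]
      congr 1
      exact pvPm_congr _ _ _ (by simp [hc])

-- ===== VERDICT (by name: the statement is the Claim_ definition above) =====
theorem separate_minusoperators_spec : Claim_equal_separate_minusoperators := by
  intro query _
  unfold Spec_separate_minusoperators separate_minusoperators separate_minusoperators_alt
  have hA := foldA_eq_pvPm query.toList true []
  have hB := splitB_eq_pvPm query.toList true
  have hmf : pvMF true (query.toList.splitOnP (· == '('))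
      = (query.toList.splitOnP (· == '(')).map pvSegMap := by
    obtain ⟨hd, tl, hsp⟩ := List.exists_cons_of_ne_nil (List.splitOnP_ne_nil (· == '(') query.toList)
    rw [hsp]; simp [pvMF]
  rw [hmf] at hB
  simp only [if_true] at hA hB
  rw [hA, List.nil_append]
  rw [show query.toList.splitOn '(' = query.toList.splitOnP (· == '(') from rfl, hB]
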